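-- pv_equiv track=rewrite | github.com/amir-zeldes/gum | _build/utils/depedit.py | bins_compatible
-- ===== SOURCE A (Python) =====
-- def bins_compatible(bin1, bin2):
--     overlap = False
--     non_overlap = False
--     for key in bin1:
--         if key in bin2:
--             if bin1[key] == bin2[key]:
--                 overlap = True
--         if key not in bin2:
--             non_overlap = True
--     if overlap and non_overlap:
--         return True
--     else:
--         return False
-- ===== SOURCE B (Python) =====
-- def bins_compatible(bin1, bin2):
--     k1 = sorted(bin1)
--     k2 = sorted(bin2)
--     overlap = False
--     non_overlap = False
--     i = j = 0
--     while i < len(k1):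
--         if j >= len(k2) or k1[i] < k2[j]:
--             non_overlap = True
--             i += 1
--         elif k2[j] < k1[i]:
--             j += 1
--         else:
--             if bin1[k1[i]] == bin2[k2[j]]:
--                 overlap = True
--             i += 1
--             j += 1
--     return overlap and non_overlap
-- ===== Notes on version B (the rewrite author's own statement) =====
-- stated objective: alternative
-- what changed: Replaces A's per-key dict-membership loop with two flags by sorting both key lists and running a two-pointer merge scan that detects a bin1-only key when the pointers pass each other and tests value equality when the keys meet.
import Mathlib
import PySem

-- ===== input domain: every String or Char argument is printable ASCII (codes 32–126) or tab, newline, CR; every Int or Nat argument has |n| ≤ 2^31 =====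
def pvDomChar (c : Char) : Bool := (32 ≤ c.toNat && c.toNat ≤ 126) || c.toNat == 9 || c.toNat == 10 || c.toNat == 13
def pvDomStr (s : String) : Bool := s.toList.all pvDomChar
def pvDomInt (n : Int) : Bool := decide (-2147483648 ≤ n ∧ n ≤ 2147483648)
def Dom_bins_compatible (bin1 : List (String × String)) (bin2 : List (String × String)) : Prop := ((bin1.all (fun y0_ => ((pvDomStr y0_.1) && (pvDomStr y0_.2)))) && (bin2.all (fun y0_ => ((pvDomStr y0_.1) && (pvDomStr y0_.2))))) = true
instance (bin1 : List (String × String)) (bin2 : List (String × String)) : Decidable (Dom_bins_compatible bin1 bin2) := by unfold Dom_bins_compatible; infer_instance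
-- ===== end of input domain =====

-- B replaces A's per-key two-flag dict-membership loop by sorting both key lists and running
-- a two-pointer merge scan that detects a shared key with equal values and a bin1-only key (objective: alternative).

-- ===== PORT A =====
-- Python dict arguments become PySem.Dict (built from the association list; last duplicate wins, as dict() does).
def bins_compatible (bin1 : List (String × String)) (bin2 : List (String × String)) : Bool :=
  let d1 := PySem.Dict.ofList bin1
  let d2 := PySem.Dict.ofList bin2
  -- for key in bin1: two flags; bin1[key]/bin2[key] are read as getD "" — the keys are present, so "" is never used
  let st := d1.keys.foldl (fun (st : Bool × Bool) key =>
    let st1 := if d2.contains key then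
        (if d1.getD key "" == d2.getD key "" then (true, st.2) else st)
      else st
    if !(d2.contains key) then (st1.1, true) else st1) (false, false)
  if st.1 && st.2 then true else false

-- ===== PORT B =====
-- B's while loop over the two sorted key lists, as structural recursion on the two lists:
-- state (overlap, non_overlap); advance the pointer(s) exactly as Source B does.
def pvMergeScan (d1 d2 : PySem.Dict String String) : List String → List String → Bool × Bool
  | [], _ => (false, false)
  | _ :: ks1, [] =>
      let r := pvMergeScan d1 d2 ks1 []
      (r.1, true)
  | k1 :: ks1, k2 :: ks2 =>
      if k1 < k2 then
        let r := pvMergeScan d1 d2 ks1 (k2 :: ks2)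
        (r.1, true)
      else if k2 < k1 then
        pvMergeScan d1 d2 (k1 :: ks1) ks2
      else
        let r := pvMergeScan d1 d2 ks1 ks2
        ((if d1.getD k1 "" == d2.getD k2 "" then true else r.1), r.2)
  termination_by l1 l2 => l1.length + l2.length

def bins_compatible_alt (bin1 : List (String × String)) (bin2 : List (String × String)) : Bool :=
  let d1 := PySem.Dict.ofList bin1
  let d2 := PySem.Dict.ofList bin2
  let k1s := PySem.List.sorted d1.keys (fun x => x) false   -- sorted(bin1)
  let k2s := PySem.List.sorted d2.keys (fun x => x) false   -- sorted(bin2)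
  let r := pvMergeScan d1 d2 k1s k2s
  r.1 && r.2

-- ===== PRECONDITION & SPEC =====
def Spec_bins_compatible (bin1 : List (String × String)) (bin2 : List (String × String)) (out : Bool) : Prop := out = bins_compatible_alt bin1 bin2
instance (bin1 : List (String × String)) (bin2 : List (String × String)) (out : Bool) : Decidable (Spec_bins_compatible bin1 bin2 out) := by unfold Spec_bins_compatible; infer_instance

-- ===== CLAIM (what is proved, stated in full; the proofs are below) =====
def Claim_equal_bins_compatible : Prop := ∀ (bin1 : List (String × String)) (bin2 : List (String × String)), Dom_bins_compatible bin1 bin2 → Spec_bins_compatible bin1 bin2 (bins_compatible bin1 bin2)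

-- ===== LEMMAS AND PROOFS =====

-- A's loop, from any starting flag pair, just ORs in "some shared key with equal values" / "some key missing from bin2".
theorem binsA_foldl (f g : String → Bool) (l : List String) (st : Bool × Bool) :
    l.foldl (fun (st : Bool × Bool) key =>
      let st1 := if g key then (if f key then (true, st.2) else st) else st
      if !(g key) then (st1.1, true) else st1) st
    = (st.1 || l.any (fun k => g k && f k), st.2 || l.any (fun k => !(g k))) := by
  induction l generalizing st with
  | nil => simp
  | cons k l ih =>
    rw [List.foldl_cons, ih]
    cases hg : g k <;> cases hf : f k <;> simp [hg, hf]

-- an `any` is determined by its predicate's values on the members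
theorem any_congr_mem (l : List String) (p q : String → Bool) (h : ∀ a ∈ l, p a = q a) :
    l.any p = l.any q := by
  induction l with
  | nil => rfl
  | cons a t ih =>
    simp only [List.any_cons, h a (by simp), ih (fun b hb => h b (by simp [hb]))]

-- an `any` that inspects membership in a cons ignores the head when it occurs in none of the elements
theorem any_mem_cons_of_ne (l : List String) (x : String) (xs : List String)
    (h : ∀ k ∈ l, k ≠ x) (g : Bool → String → Bool) :
    l.any (fun k => g (decide (k ∈ x :: xs)) k) = l.any (fun k => g (decide (k ∈ xs)) k) := by
  apply any_congr_mem
  intro a ha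
  have ha' := h a ha
  congr 1
  simp [List.mem_cons, ha']

-- the merge scan over two strictly sorted key lists computes the two existence flags
theorem pvMergeScan_spec (d1 d2 : PySem.Dict String String) (l1 l2 : List String)
    (h1 : l1.Pairwise (· < ·)) (h2 : l2.Pairwise (· < ·)) :
    pvMergeScan d1 d2 l1 l2
      = (l1.any (fun k => decide (k ∈ l2) && (d1.getD k "" == d2.getD k "")),
         l1.any (fun k => !decide (k ∈ l2))) := by
  induction l1, l2 using pvMergeScan.induct d1 d2 with
  | case1 l2 => simp [pvMergeScan]
  | case2 k1 ks1 ih =>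
    rw [pvMergeScan, ih (List.Pairwise.of_cons h1) h2]
    simp
  | case3 k1 ks1 k2 ks2 hlt ih =>
    have hk1 : decide (k1 ∈ k2 :: ks2) = false := by
      simp only [decide_eq_false_iff_not]
      intro hm
      rcases List.mem_cons.mp hm with h | h
      · exact absurd (h ▸ hlt) (lt_irrefl _)
      · exact absurd (hlt.trans (List.rel_of_pairwise_cons h2 h)) (lt_irrefl _)
    rw [pvMergeScan, if_pos hlt, ih (List.Pairwise.of_cons h1) h2]
    simp only [List.any_cons, hk1, Bool.false_and, Bool.false_or, Bool.not_false, Bool.true_or]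
  | case4 k1 ks1 k2 ks2 hnlt hlt ih =>
    have hne : ∀ k ∈ k1 :: ks1, k ≠ k2 := by
      intro k hk he
      subst he
      rcases List.mem_cons.mp hk with h | h
      · exact absurd (h ▸ hlt) (lt_irrefl _)
      · exact absurd (hlt.trans (List.rel_of_pairwise_cons h1 h)) (lt_irrefl _)
    rw [pvMergeScan, if_neg hnlt, if_pos hlt, ih h1 (List.Pairwise.of_cons h2),
      ← any_mem_cons_of_ne _ _ _ hne (fun b k => b && (d1.getD k "" == d2.getD k "")),
      ← any_mem_cons_of_ne _ _ _ hne (fun b _ => !b)]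
  | case5 k1 ks1 k2 ks2 hnlt hnlt' ih =>
    have heq : k1 = k2 := le_antisymm (not_lt.mp hnlt') (not_lt.mp hnlt)
    subst heq
    have hne : ∀ k ∈ ks1, k ≠ k1 := fun k hk he =>
      absurd (he ▸ List.rel_of_pairwise_cons h1 hk) (lt_irrefl _)
    rw [pvMergeScan, if_neg hnlt, if_neg hnlt',
      ih (List.Pairwise.of_cons h1) (List.Pairwise.of_cons h2)]
    have e1 := any_mem_cons_of_ne ks1 k1 ks2 hne
      (fun b k => b && (d1.getD k "" == d2.getD k ""))
    have e2 := any_mem_cons_of_ne ks1 k1 ks2 hne (fun b _ => !b)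
    simp only [List.any_cons, List.mem_cons, true_or, decide_true, Bool.true_and,
      Bool.not_true, Bool.false_or, ← e1, ← e2]
    cases h : (d1.getD k1 "" == d2.getD k1 "")
    · simp [h]
    · simp

-- the sorted key list of a dict is strictly increasing
theorem sorted_keys_pairwise_lt (d : PySem.Dict String String) (h : d.keys.Nodup) :
    (PySem.List.sorted d.keys (fun x => x) false).Pairwise (· < ·) := by
  have hle := PySem.List.sorted_pairwise d.keys (fun x => x)
  have hnd : (PySem.List.sorted d.keys (fun x => x) false).Nodup :=
    (PySem.List.sorted_perm d.keys (fun x => x) false).nodup_iff.mpr h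
  exact (hle.and hnd).imp fun ⟨hab, hne⟩ => lt_of_le_of_ne hab hne

-- ===== VERDICT (by name: the statement is the Claim_ definition above) =====
theorem bins_compatible_spec : Claim_equal_bins_compatible := by
  intro bin1 bin2 _
  show bins_compatible bin1 bin2 = bins_compatible_alt bin1 bin2
  simp only [bins_compatible, bins_compatible_alt]
  have hn1 : (PySem.Dict.ofList bin1).keys.Nodup := PySem.Dict.nodup_keys_ofList bin1
  have hn2 : (PySem.Dict.ofList bin2).keys.Nodup := PySem.Dict.nodup_keys_ofList bin2
  rw [pvMergeScan_spec _ _ _ _ (sorted_keys_pairwise_lt _ hn1) (sorted_keys_pairwise_lt _ hn2)]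
  simp only [binsA_foldl, Bool.false_or]
  have hperm := PySem.List.sorted_perm (PySem.Dict.ofList bin1).keys (fun x => x) (rev := false)
  have hc : ∀ k : String,
      (decide (k ∈ PySem.List.sorted (PySem.Dict.ofList bin2).keys (fun x => x) false))
        = (PySem.Dict.ofList bin2).contains k := by
    intro k
    rw [PySem.Dict.contains_eq_decide_mem_keys]
    simp [PySem.List.mem_sorted]
  rw [hperm.any_eq, hperm.any_eq]
  have g1 : ((PySem.Dict.ofList bin1).keys.any
      (fun k => decide (k ∈ PySem.List.sorted (PySem.Dict.ofList bin2).keys (fun x => x) false)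
        && ((PySem.Dict.ofList bin1).getD k "" == (PySem.Dict.ofList bin2).getD k "")))
      = (PySem.Dict.ofList bin1).keys.any (fun k => (PySem.Dict.ofList bin2).contains k
        && ((PySem.Dict.ofList bin1).getD k "" == (PySem.Dict.ofList bin2).getD k "")) :=
    any_congr_mem _ _ _ (fun k _ => by rw [hc k])
  have g2 : ((PySem.Dict.ofList bin1).keys.any
      (fun k => !decide (k ∈ PySem.List.sorted (PySem.Dict.ofList bin2).keys (fun x => x) false)))
      = (PySem.Dict.ofList bin1).keys.any (fun k => !((PySem.Dict.ofList bin2).contains k)) :=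
    any_congr_mem _ _ _ (fun k _ => by rw [hc k])
  rw [g1, g2]
  split
  · next h => exact h.symm
  · next h => simp only [Bool.not_eq_true] at h; exact h.symm
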